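-- pv_equiv track=rewrite | github.com/rebeccalwagner/PPOL_5205_FinalProject | code/congress_api/congress_api_functions.py | _get_latest_bill_version
-- ===== SOURCE A (Python) =====
-- def _get_latest_bill_version(versions):
--
--     # most recent to least recent order (house/senate variable)
--     priority_order = [
--         "Public Law",
--         "Enrolled Bill",
--         "Reported to House",
--         "Reported to Senate",
--         "Referred in House",
--         "Referred in Senate",
--         "Engrossed in House",
--         "Engrossed in Senate",
--         "Introduced in House",
--         "Introduced in Senate"
--     ]
--
--     for stage in priority_order:
--         for version in versions:
--             if version.get("type") == stage:
--                 return stage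
-- ===== SOURCE B (Python) =====
-- def _get_latest_bill_version(versions):
--
--     priority_order = [
--         "Public Law",
--         "Enrolled Bill",
--         "Reported to House",
--         "Reported to Senate",
--         "Referred in House",
--         "Referred in Senate",
--         "Engrossed in House",
--         "Engrossed in Senate",
--         "Introduced in House",
--         "Introduced in Senate"
--     ]
--
--     rank = {stage: i for i, stage in enumerate(priority_order)}
--
--     best = None
--     for version in versions:
--         r = rank.get(version.get("type"))
--         if r is not None and (best is None or r < best):
--             best = r
--
--     return None if best is None else priority_order[best]
-- ===== Notes on version B (the rewrite author's own statement) =====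
-- stated objective: alternative
-- what changed: B makes a single argmin pass over versions, tracking the smallest priority rank seen via a precomputed stage->rank table, instead of A's nested rescan of versions for each priority stage.
import Mathlib
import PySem

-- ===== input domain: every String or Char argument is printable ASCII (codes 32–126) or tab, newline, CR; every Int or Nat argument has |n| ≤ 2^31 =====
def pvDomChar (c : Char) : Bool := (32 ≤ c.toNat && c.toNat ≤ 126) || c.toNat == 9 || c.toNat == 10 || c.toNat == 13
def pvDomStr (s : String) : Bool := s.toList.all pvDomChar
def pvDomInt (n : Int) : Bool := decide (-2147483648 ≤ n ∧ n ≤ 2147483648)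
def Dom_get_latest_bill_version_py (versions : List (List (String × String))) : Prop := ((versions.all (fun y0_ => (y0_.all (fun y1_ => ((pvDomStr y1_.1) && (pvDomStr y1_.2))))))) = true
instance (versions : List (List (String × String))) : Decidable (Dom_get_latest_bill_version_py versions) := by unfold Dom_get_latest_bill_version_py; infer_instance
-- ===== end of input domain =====

-- B replaces A's nested rescan of `versions` per priority stage by a single argmin pass over
-- `versions` that tracks the smallest priority rank seen, via a precomputed stage→rank table
-- (objective: alternative decomposition).

-- ===== PORT A =====
def pvPriority : List String :=
  ["Public Law", "Enrolled Bill", "Reported to House", "Reported to Senate",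
   "Referred in House", "Referred in Senate", "Engrossed in House", "Engrossed in Senate",
   "Introduced in House", "Introduced in Senate"]

-- A's inner loop: 'for version in versions: if version.get("type") == stage: return stage'
def pvInnerA (stage : String) (versions : List (List (String × String))) : Option String :=
  match versions with
  | [] => none
  | v :: rest =>
    if (PySem.Dict.ofList v).get? "type" == some stage then some stage else pvInnerA stage rest

-- A's outer loop over priority_order
def pvOuterA (stages : List String) (versions : List (List (String × String))) : Option String :=
  match stages with
  | [] => none
  | s :: rest =>
    match pvInnerA s versions with
    | some x => some x
    | none => pvOuterA rest versions

def get_latest_bill_version_py (versions : List (List (String × String))) : Option String :=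
  pvOuterA pvPriority versions

-- ===== PORT B =====
-- rank = {stage: i for i, stage in enumerate(priority_order)}
def pvRank : PySem.Dict String Int :=
  (PySem.List.enumerate pvPriority).foldl (fun d p => d.insert p.2 p.1) PySem.Dict.empty

-- loop body: r = rank.get(version.get("type")); if r is not None and (best is None or r < best): best = r
def pvStep (best : Option Int) (t : Option String) : Option Int :=
  match t.bind (fun s => pvRank.get? s) with
  | none => best
  | some r =>
    match best with
    | none => some r
    | some b => if r < b then some r else best

def get_latest_bill_version_py_alt (versions : List (List (String × String))) : Option String :=
  -- for version in versions: …
  match versions.foldl (fun best v => pvStep best ((PySem.Dict.ofList v).get? "type")) none with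
  | none => none
  -- return priority_order[best]; best always comes from rank's values so the index is in range
  | some b => PySem.List.pyGet? pvPriority b

-- ===== PRECONDITION & SPEC =====
def Spec_get_latest_bill_version_py (versions : List (List (String × String))) (out : Option String) : Prop := out = get_latest_bill_version_py_alt versions
instance (versions : List (List (String × String))) (out : Option String) : Decidable (Spec_get_latest_bill_version_py versions out) := by unfold Spec_get_latest_bill_version_py; infer_instance

-- ===== CLAIM (what is proved, stated in full; the proofs are below) =====
def Claim_equal_get_latest_bill_version_py : Prop := ∀ (versions : List (List (String × String))), Dom_get_latest_bill_version_py versions → Spec_get_latest_bill_version_py versions (get_latest_bill_version_py versions)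

-- ===== LEMMAS AND PROOFS =====

-- the list of "type" lookups, the quantity both programs inspect
def pvTypes (versions : List (List (String × String))) : List (Option String) :=
  versions.map (fun v => (PySem.Dict.ofList v).get? "type")

theorem pvInnerA_eq (s : String) (versions : List (List (String × String))) :
    pvInnerA s versions = if some s ∈ pvTypes versions then some s else none := by
  induction versions with
  | nil => simp [pvInnerA, pvTypes]
  | cons v rest ih =>
    simp only [pvInnerA, ih, pvTypes, List.map_cons, List.mem_cons]
    by_cases h : (PySem.Dict.ofList v).get? "type" = some s
    · simp [h]
    · have h' : ¬ some s = (PySem.Dict.ofList v).get? "type" := fun e => h e.symm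
      simp [beq_iff_eq, h, h']

-- the rank dict, evaluated
theorem pvRank_eq : pvRank = PySem.Dict.mk
    [("Public Law", 0), ("Enrolled Bill", 1), ("Reported to House", 2), ("Reported to Senate", 3),
     ("Referred in House", 4), ("Referred in Senate", 5), ("Engrossed in House", 6),
     ("Engrossed in Senate", 7), ("Introduced in House", 8), ("Introduced in Senate", 9)] := by
  decide

-- a successful rank lookup pins both the stage string and its rank
theorem pvRank_char (s : String) (r : Int) (h : pvRank.get? s = some r) :
    (s = "Public Law" ∧ r = 0) ∨ (s = "Enrolled Bill" ∧ r = 1) ∨ (s = "Reported to House" ∧ r = 2) ∨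
    (s = "Reported to Senate" ∧ r = 3) ∨ (s = "Referred in House" ∧ r = 4) ∨
    (s = "Referred in Senate" ∧ r = 5) ∨ (s = "Engrossed in House" ∧ r = 6) ∨
    (s = "Engrossed in Senate" ∧ r = 7) ∨ (s = "Introduced in House" ∧ r = 8) ∨
    (s = "Introduced in Senate" ∧ r = 9) := by
  rw [pvRank_eq] at h
  simp only [PySem.Dict.get?_mk_cons] at h
  split_ifs at h with h1 h2 h3 h4 h5 h6 h7 h8 h9 h10
  all_goals first
    | (simp only [beq_iff_eq] at *; simp_all)
    | (exfalso; simp [PySem.Dict.get?] at h)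

-- once the accumulator is a `some`, it stays a `some`
theorem pvStep_isSome (b : Int) (t : Option String) : (pvStep (some b) t).isSome := by
  unfold pvStep
  rcases he : t.bind (fun s => pvRank.get? s) with _ | r
  · simp
  · dsimp only
    split_ifs <;> simp

theorem pvFold_isSome (types : List (Option String)) (b : Int) :
    (types.foldl pvStep (some b)).isSome := by
  induction types generalizing b with
  | nil => simp
  | cons t rest ih =>
    simp only [List.foldl_cons]
    rcases Option.isSome_iff_exists.mp (pvStep_isSome b t) with ⟨b', hb'⟩
    rw [hb']
    exact ih b'

-- if no element has a rank, the accumulator never changes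
theorem pvFold_none (types : List (Option String))
    (h : ∀ t ∈ types, t.bind (fun s => pvRank.get? s) = none) :
    types.foldl pvStep none = none := by
  induction types with
  | nil => rfl
  | cons t rest ih =>
    have ht := h t (by simp)
    have hstep : pvStep none t = none := by unfold pvStep; rw [ht]
    simp only [List.foldl_cons, hstep]
    exact ih (fun t' h' => h t' (by simp [h']))

-- characterisation of the fold's result: it is one of the ranks and a lower bound of all of them
theorem pvFold_char (types : List (Option String)) (acc : Option Int) (r : Int)
    (h : types.foldl pvStep acc = some r) :
    (acc = some r ∨ ∃ t ∈ types, t.bind (fun s => pvRank.get? s) = some r) ∧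
    (∀ b, acc = some b → r ≤ b) ∧
    (∀ t ∈ types, ∀ r', t.bind (fun s => pvRank.get? s) = some r' → r ≤ r') := by
  induction types generalizing acc with
  | nil =>
    simp only [List.foldl_nil] at h
    refine ⟨Or.inl h, ?_, ?_⟩
    · intro b hb; rw [hb] at h; have := Option.some.inj h; omega
    · intro t ht; simp at ht
  | cons t rest ih =>
    simp only [List.foldl_cons] at h
    rcases he : t.bind (fun s => pvRank.get? s) with _ | q
    · have hstep : pvStep acc t = acc := by unfold pvStep; rw [he]
      rw [hstep] at h
      obtain ⟨hmem, hacc, hrest⟩ := ih acc h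
      refine ⟨?_, hacc, ?_⟩
      · rcases hmem with h' | ⟨t', ht', hq⟩
        · exact Or.inl h'
        · exact Or.inr ⟨t', by simp [ht'], hq⟩
      · intro t' ht' r' hr'
        rcases List.mem_cons.mp ht' with rfl | ht''
        · rw [he] at hr'; exact absurd hr' (by simp)
        · exact hrest t' ht'' r' hr'
    · rcases acc with _ | b
      · have hstep : pvStep none t = some q := by unfold pvStep; rw [he]
        rw [hstep] at h
        obtain ⟨hmem, hacc, hrest⟩ := ih (some q) h
        have hrq : r ≤ q := hacc q rfl
        refine ⟨Or.inr ?_, ?_, ?_⟩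
        · rcases hmem with h' | ⟨t', ht', hq'⟩
          · exact ⟨t, by simp, by rw [he, Option.some.inj h']⟩
          · exact ⟨t', by simp [ht'], hq'⟩
        · intro b hb; exact absurd hb (by simp)
        · intro t' ht' r' hr'
          rcases List.mem_cons.mp ht' with rfl | ht''
          · rw [he] at hr'; have := Option.some.inj hr'; omega
          · exact hrest t' ht'' r' hr'
      · have hstep : pvStep (some b) t = if q < b then some q else some b := by
          unfold pvStep; rw [he]
        by_cases hlt : q < b
        · rw [hstep, if_pos hlt] at h
          obtain ⟨hmem, hacc, hrest⟩ := ih (some q) h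
          have hrq : r ≤ q := hacc q rfl
          refine ⟨?_, ?_, ?_⟩
          · rcases hmem with h' | ⟨t', ht', hq'⟩
            · exact Or.inr ⟨t, by simp, by rw [he, Option.some.inj h']⟩
            · exact Or.inr ⟨t', by simp [ht'], hq'⟩
          · intro b' hb'; have := Option.some.inj hb'; omega
          · intro t' ht' r' hr'
            rcases List.mem_cons.mp ht' with rfl | ht''
            · rw [he] at hr'; have := Option.some.inj hr'; omega
            · exact hrest t' ht'' r' hr'
        · rw [hstep, if_neg hlt] at h
          obtain ⟨hmem, hacc, hrest⟩ := ih (some b) h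
          have hrb : r ≤ b := hacc b rfl
          refine ⟨?_, ?_, ?_⟩
          · rcases hmem with h' | ⟨t', ht', hq'⟩
            · exact Or.inl h'
            · exact Or.inr ⟨t', by simp [ht'], hq'⟩
          · intro b' hb'; have := Option.some.inj hb'; omega
          · intro t' ht' r' hr'
            rcases List.mem_cons.mp ht' with rfl | ht''
            · rw [he] at hr'; have := Option.some.inj hr'; omega
            · exact hrest t' ht'' r' hr'

-- if stage s (of rank i) occurs and i is a lower bound of all occurring ranks, the fold is `some i`
theorem pvBranch (versions : List (List (String × String))) (i : Int) (s : String)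
    (hmem : some s ∈ pvTypes versions) (hrank : pvRank.get? s = some i)
    (hmin : ∀ t ∈ pvTypes versions, ∀ r', t.bind (fun s' => pvRank.get? s') = some r' → i ≤ r') :
    (pvTypes versions).foldl pvStep none = some i := by
  obtain ⟨l1, l2, hsplit⟩ := List.append_of_mem hmem
  have hs : (pvTypes versions).foldl pvStep none =
      l2.foldl pvStep (pvStep (l1.foldl pvStep none) (some s)) := by
    rw [hsplit]; simp [List.foldl_append]
  have hsome : ((pvTypes versions).foldl pvStep none).isSome := by
    rw [hs]
    have : (pvStep (l1.foldl pvStep none) (some s)).isSome := by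
      rcases l1.foldl pvStep none with _ | b
      · unfold pvStep; simp [hrank]
      · exact pvStep_isSome b (some s)
    rcases Option.isSome_iff_exists.mp this with ⟨b, hb⟩
    rw [hb]; exact pvFold_isSome l2 b
  rcases Option.isSome_iff_exists.mp hsome with ⟨r, hr⟩
  obtain ⟨hm, _, hlow⟩ := pvFold_char _ _ _ hr
  have hri : r ≤ i := hlow (some s) hmem i (by simp [hrank])
  rcases hm with h' | ⟨t, ht, hq⟩
  · simp at h'
  · have hir : i ≤ r := hmin t ht r hq
    rw [hr]; congr 1; omega
theorem pvAlt_eq (versions : List (List (String × String))) :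
    get_latest_bill_version_py_alt versions =
      match (pvTypes versions).foldl pvStep none with
      | none => none
      | some b => PySem.List.pyGet? pvPriority b := by
  unfold get_latest_bill_version_py_alt pvTypes
  rw [List.foldl_map]

-- ===== VERDICT (by name: the statement is the Claim_ definition above) =====
theorem get_latest_bill_version_py_spec : Claim_equal_get_latest_bill_version_py := by
  intro versions _
  unfold Spec_get_latest_bill_version_py
  by_cases h0 : some "Public Law" ∈ pvTypes versions
  · have hb : (pvTypes versions).foldl pvStep none = some (0 : Int) := by
      refine pvBranch versions 0 "Public Law" h0 (by decide) ?_
      intro t ht r' hr'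
      rcases t with _ | s'
      · simp at hr'
      · simp only [Option.bind_some] at hr'
        rcases pvRank_char s' r' hr' with ⟨rfl, rfl⟩|⟨rfl, rfl⟩|⟨rfl, rfl⟩|⟨rfl, rfl⟩|⟨rfl, rfl⟩|⟨rfl, rfl⟩|⟨rfl, rfl⟩|⟨rfl, rfl⟩|⟨rfl, rfl⟩|⟨rfl, rfl⟩ <;>
          first | omega | simp_all
    rw [pvAlt_eq, hb]
    show get_latest_bill_version_py versions = some "Public Law"
    simp [get_latest_bill_version_py, pvOuterA, pvInnerA_eq, pvPriority, h0]
  · 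
    by_cases h1 : some "Enrolled Bill" ∈ pvTypes versions
    · have hb : (pvTypes versions).foldl pvStep none = some (1 : Int) := by
        refine pvBranch versions 1 "Enrolled Bill" h1 (by decide) ?_
        intro t ht r' hr'
        rcases t with _ | s'
        · simp at hr'
        · simp only [Option.bind_some] at hr'
          rcases pvRank_char s' r' hr' with ⟨rfl, rfl⟩|⟨rfl, rfl⟩|⟨rfl, rfl⟩|⟨rfl, rfl⟩|⟨rfl, rfl⟩|⟨rfl, rfl⟩|⟨rfl, rfl⟩|⟨rfl, rfl⟩|⟨rfl, rfl⟩|⟨rfl, rfl⟩ <;>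
            first | omega | simp_all
      rw [pvAlt_eq, hb]
      show get_latest_bill_version_py versions = some "Enrolled Bill"
      simp [get_latest_bill_version_py, pvOuterA, pvInnerA_eq, pvPriority, h0, h1]
    · 
      by_cases h2 : some "Reported to House" ∈ pvTypes versions
      · have hb : (pvTypes versions).foldl pvStep none = some (2 : Int) := by
          refine pvBranch versions 2 "Reported to House" h2 (by decide) ?_
          intro t ht r' hr'
          rcases t with _ | s'
          · simp at hr'
          · simp only [Option.bind_some] at hr'
            rcases pvRank_char s' r' hr' with ⟨rfl, rfl⟩|⟨rfl, rfl⟩|⟨rfl, rfl⟩|⟨rfl, rfl⟩|⟨rfl, rfl⟩|⟨rfl, rfl⟩|⟨rfl, rfl⟩|⟨rfl, rfl⟩|⟨rfl, rfl⟩|⟨rfl, rfl⟩ <;>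
              first | omega | simp_all
        rw [pvAlt_eq, hb]
        show get_latest_bill_version_py versions = some "Reported to House"
        simp [get_latest_bill_version_py, pvOuterA, pvInnerA_eq, pvPriority, h0, h1, h2]
      · 
        by_cases h3 : some "Reported to Senate" ∈ pvTypes versions
        · have hb : (pvTypes versions).foldl pvStep none = some (3 : Int) := by
            refine pvBranch versions 3 "Reported to Senate" h3 (by decide) ?_
            intro t ht r' hr'
            rcases t with _ | s'
            · simp at hr'
            · simp only [Option.bind_some] at hr'
              rcases pvRank_char s' r' hr' with ⟨rfl, rfl⟩|⟨rfl, rfl⟩|⟨rfl, rfl⟩|⟨rfl, rfl⟩|⟨rfl, rfl⟩|⟨rfl, rfl⟩|⟨rfl, rfl⟩|⟨rfl, rfl⟩|⟨rfl, rfl⟩|⟨rfl, rfl⟩ <;>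
                first | omega | simp_all
          rw [pvAlt_eq, hb]
          show get_latest_bill_version_py versions = some "Reported to Senate"
          simp [get_latest_bill_version_py, pvOuterA, pvInnerA_eq, pvPriority, h0, h1, h2, h3]
        · 
          by_cases h4 : some "Referred in House" ∈ pvTypes versions
          · have hb : (pvTypes versions).foldl pvStep none = some (4 : Int) := by
              refine pvBranch versions 4 "Referred in House" h4 (by decide) ?_
              intro t ht r' hr'
              rcases t with _ | s'
              · simp at hr'
              · simp only [Option.bind_some] at hr'
                rcases pvRank_char s' r' hr' with ⟨rfl, rfl⟩|⟨rfl, rfl⟩|⟨rfl, rfl⟩|⟨rfl, rfl⟩|⟨rfl, rfl⟩|⟨rfl, rfl⟩|⟨rfl, rfl⟩|⟨rfl, rfl⟩|⟨rfl, rfl⟩|⟨rfl, rfl⟩ <;>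
                  first | omega | simp_all
            rw [pvAlt_eq, hb]
            show get_latest_bill_version_py versions = some "Referred in House"
            simp [get_latest_bill_version_py, pvOuterA, pvInnerA_eq, pvPriority, h0, h1, h2, h3, h4]
          · 
            by_cases h5 : some "Referred in Senate" ∈ pvTypes versions
            · have hb : (pvTypes versions).foldl pvStep none = some (5 : Int) := by
                refine pvBranch versions 5 "Referred in Senate" h5 (by decide) ?_
                intro t ht r' hr'
                rcases t with _ | s'
                · simp at hr'
                · simp only [Option.bind_some] at hr'
                  rcases pvRank_char s' r' hr' with ⟨rfl, rfl⟩|⟨rfl, rfl⟩|⟨rfl, rfl⟩|⟨rfl, rfl⟩|⟨rfl, rfl⟩|⟨rfl, rfl⟩|⟨rfl, rfl⟩|⟨rfl, rfl⟩|⟨rfl, rfl⟩|⟨rfl, rfl⟩ <;>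
                    first | omega | simp_all
              rw [pvAlt_eq, hb]
              show get_latest_bill_version_py versions = some "Referred in Senate"
              simp [get_latest_bill_version_py, pvOuterA, pvInnerA_eq, pvPriority, h0, h1, h2, h3, h4, h5]
            · 
              by_cases h6 : some "Engrossed in House" ∈ pvTypes versions
              · have hb : (pvTypes versions).foldl pvStep none = some (6 : Int) := by
                  refine pvBranch versions 6 "Engrossed in House" h6 (by decide) ?_
                  intro t ht r' hr'
                  rcases t with _ | s'
                  · simp at hr'
                  · simp only [Option.bind_some] at hr'
                    rcases pvRank_char s' r' hr' with ⟨rfl, rfl⟩|⟨rfl, rfl⟩|⟨rfl, rfl⟩|⟨rfl, rfl⟩|⟨rfl, rfl⟩|⟨rfl, rfl⟩|⟨rfl, rfl⟩|⟨rfl, rfl⟩|⟨rfl, rfl⟩|⟨rfl, rfl⟩ <;>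
                      first | omega | simp_all
                rw [pvAlt_eq, hb]
                show get_latest_bill_version_py versions = some "Engrossed in House"
                simp [get_latest_bill_version_py, pvOuterA, pvInnerA_eq, pvPriority, h0, h1, h2, h3, h4, h5, h6]
              · 
                by_cases h7 : some "Engrossed in Senate" ∈ pvTypes versions
                · have hb : (pvTypes versions).foldl pvStep none = some (7 : Int) := by
                    refine pvBranch versions 7 "Engrossed in Senate" h7 (by decide) ?_
                    intro t ht r' hr'
                    rcases t with _ | s'
                    · simp at hr'
                    · simp only [Option.bind_some] at hr'
                      rcases pvRank_char s' r' hr' with ⟨rfl, rfl⟩|⟨rfl, rfl⟩|⟨rfl, rfl⟩|⟨rfl, rfl⟩|⟨rfl, rfl⟩|⟨rfl, rfl⟩|⟨rfl, rfl⟩|⟨rfl, rfl⟩|⟨rfl, rfl⟩|⟨rfl, rfl⟩ <;>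
                        first | omega | simp_all
                  rw [pvAlt_eq, hb]
                  show get_latest_bill_version_py versions = some "Engrossed in Senate"
                  simp [get_latest_bill_version_py, pvOuterA, pvInnerA_eq, pvPriority, h0, h1, h2, h3, h4, h5, h6, h7]
                · 
                  by_cases h8 : some "Introduced in House" ∈ pvTypes versions
                  · have hb : (pvTypes versions).foldl pvStep none = some (8 : Int) := by
                      refine pvBranch versions 8 "Introduced in House" h8 (by decide) ?_
                      intro t ht r' hr'
                      rcases t with _ | s'
                      · simp at hr'
                      · simp only [Option.bind_some] at hr'
                        rcases pvRank_char s' r' hr' with ⟨rfl, rfl⟩|⟨rfl, rfl⟩|⟨rfl, rfl⟩|⟨rfl, rfl⟩|⟨rfl, rfl⟩|⟨rfl, rfl⟩|⟨rfl, rfl⟩|⟨rfl, rfl⟩|⟨rfl, rfl⟩|⟨rfl, rfl⟩ <;>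
                          first | omega | simp_all
                    rw [pvAlt_eq, hb]
                    show get_latest_bill_version_py versions = some "Introduced in House"
                    simp [get_latest_bill_version_py, pvOuterA, pvInnerA_eq, pvPriority, h0, h1, h2, h3, h4, h5, h6, h7, h8]
                  · 
                    by_cases h9 : some "Introduced in Senate" ∈ pvTypes versions
                    · have hb : (pvTypes versions).foldl pvStep none = some (9 : Int) := by
                        refine pvBranch versions 9 "Introduced in Senate" h9 (by decide) ?_
                        intro t ht r' hr'
                        rcases t with _ | s'
                        · simp at hr'
                        · simp only [Option.bind_some] at hr'
                          rcases pvRank_char s' r' hr' with ⟨rfl, rfl⟩|⟨rfl, rfl⟩|⟨rfl, rfl⟩|⟨rfl, rfl⟩|⟨rfl, rfl⟩|⟨rfl, rfl⟩|⟨rfl, rfl⟩|⟨rfl, rfl⟩|⟨rfl, rfl⟩|⟨rfl, rfl⟩ <;>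
                            first | omega | simp_all
                      rw [pvAlt_eq, hb]
                      show get_latest_bill_version_py versions = some "Introduced in Senate"
                      simp [get_latest_bill_version_py, pvOuterA, pvInnerA_eq, pvPriority, h0, h1, h2, h3, h4, h5, h6, h7, h8, h9]
                    · have hb : (pvTypes versions).foldl pvStep none = none := by
                        refine pvFold_none _ ?_
                        intro t ht
                        rcases t with _ | s'
                        · rfl
                        · simp only [Option.bind_some]
                          rcases he : pvRank.get? s' with _ | r'
                          · rfl
                          · exfalso
                            rcases pvRank_char s' r' he with ⟨rfl, rfl⟩|⟨rfl, rfl⟩|⟨rfl, rfl⟩|⟨rfl, rfl⟩|⟨rfl, rfl⟩|⟨rfl, rfl⟩|⟨rfl, rfl⟩|⟨rfl, rfl⟩|⟨rfl, rfl⟩|⟨rfl, rfl⟩ <;> simp_all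
                      rw [pvAlt_eq, hb]
                      simp [get_latest_bill_version_py, pvOuterA, pvInnerA_eq, pvPriority, h0, h1, h2, h3, h4, h5, h6, h7, h8, h9]
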